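-- pv_equiv track=rewrite | github.com/prjct404/Phonemizer | Parsivar/Parsivar/normalizer.py | ngram_lookup
-- ===== SOURCE A (Python) =====
-- def ngram_lookup(doc_string, start, end, word_list, span):
--     result = False
--     for spanns in range(1, span):
--         if any(x in word_list for x in doc_string[:start].rsplit(maxsplit=spanns + 1)[-spanns:]):
--             result = True
--         if any(x in word_list for x in doc_string[end:].split(maxsplit=spanns + 1)[:spanns]):
--             result = True
--     return result
-- ===== SOURCE B (Python) =====
-- def ngram_lookup(doc_string, start, end, word_list, span):
--     n = span - 1
--     if n <= 0:
--         return False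
--     words = set(word_list)
--     before = doc_string[:start].split()[-n:]
--     after = doc_string[end:].split()[:n]
--     return any(w in words for w in before) or any(w in words for w in after)
-- ===== Notes on version B (the rewrite author's own statement) =====
-- stated objective: faster
-- what changed: B replaces A's loop over spanns=1..span-1 (each iteration re-splitting both halves of the string with maxsplit and testing nested word subsets) by a single split of each half and one membership test of the last span-1 / first span-1 words against a set built once, exploiting that the per-spanns word subsets are nested.
import Mathlib
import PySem

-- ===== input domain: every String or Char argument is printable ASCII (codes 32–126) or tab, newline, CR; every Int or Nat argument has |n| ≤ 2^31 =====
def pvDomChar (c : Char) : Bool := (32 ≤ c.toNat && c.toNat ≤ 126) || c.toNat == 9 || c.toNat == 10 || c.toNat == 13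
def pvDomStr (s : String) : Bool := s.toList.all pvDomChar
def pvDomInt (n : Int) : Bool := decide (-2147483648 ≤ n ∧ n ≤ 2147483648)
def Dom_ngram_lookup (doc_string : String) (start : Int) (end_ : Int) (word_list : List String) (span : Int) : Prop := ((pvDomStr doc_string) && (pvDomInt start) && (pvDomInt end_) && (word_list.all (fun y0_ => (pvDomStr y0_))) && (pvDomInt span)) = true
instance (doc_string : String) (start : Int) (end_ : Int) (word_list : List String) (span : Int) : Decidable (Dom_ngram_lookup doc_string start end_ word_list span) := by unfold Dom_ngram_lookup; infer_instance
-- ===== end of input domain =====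

-- B splits each half of the string once and tests the last span-1 / first span-1 words against a
-- set built once, instead of A's loop that re-splits both halves for every spanns = 1..span-1.

-- ===== PORT A =====
-- hand port of s.rsplit(maxsplit=m) (no PySem primitive): exact via the identity
-- s.rsplit(None, m) == [p[::-1] for p in s[::-1].split(None, m)][::-1] (whitespace is a symmetric
-- set of single characters, so right-splitting is left-splitting of the reversed string)
def pyRsplit₀Max (s : String) (m : Int) : List String :=
  ((PySem.Str.split₀Max (String.ofList s.toList.reverse) m).map
      (fun p => String.ofList p.toList.reverse)).reverse

def ngram_lookup (doc_string : String) (start : Int) (end_ : Int) (word_list : List String) (span : Int) : Bool :=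
  (PySem.List.pyRange 1 span 1).foldl
    (fun result spanns =>
      let result :=
        if (PySem.List.slice (pyRsplit₀Max (PySem.Str.slice doc_string none (some start)) (spanns + 1))
              (some (-spanns)) none).any (fun x => word_list.contains x) then true else result
      if (PySem.List.slice (PySem.Str.split₀Max (PySem.Str.slice doc_string (some end_) none) (spanns + 1))
            none (some spanns)).any (fun x => word_list.contains x) then true else result)
    false

-- ===== PORT B =====
def ngram_lookup_alt (doc_string : String) (start : Int) (end_ : Int) (word_list : List String) (span : Int) : Bool :=
  let n := span - 1
  if n ≤ 0 then false
  else
    let words := PySem.Set.ofList word_list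
    let before := PySem.List.slice (PySem.Str.split₀ (PySem.Str.slice doc_string none (some start))) (some (-n)) none
    let after := PySem.List.slice (PySem.Str.split₀ (PySem.Str.slice doc_string (some end_) none)) none (some n)
    before.any (fun w => PySem.Set.contains words w) || after.any (fun w => PySem.Set.contains words w)

-- ===== PRECONDITION & SPEC =====
def Spec_ngram_lookup (doc_string : String) (start : Int) (end_ : Int) (word_list : List String) (span : Int) (out : Bool) : Prop := out = ngram_lookup_alt doc_string start end_ word_list span
instance (doc_string : String) (start : Int) (end_ : Int) (word_list : List String) (span : Int) (out : Bool) : Decidable (Spec_ngram_lookup doc_string start end_ word_list span out) := by unfold Spec_ngram_lookup; infer_instance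

-- ===== CLAIM (what is proved, stated in full; the proofs are below) =====
def Claim_equal_ngram_lookup : Prop := ∀ (doc_string : String) (start : Int) (end_ : Int) (word_list : List String) (span : Int), Dom_ngram_lookup doc_string start end_ word_list span → Spec_ngram_lookup doc_string start end_ word_list span (ngram_lookup doc_string start end_ word_list span)

-- ===== LEMMAS AND PROOFS =====

-- the whitespace-word structure of a string: list of maximal non-space runs (fuel-based)
def wordsF : Nat → List Char → List (List Char)
  | 0, _ => []
  | fuel+1, l =>
    if (l.dropWhile PySem.Chars.isspace) = [] then []
    else ((l.dropWhile PySem.Chars.isspace).takeWhile (fun c => !PySem.Chars.isspace c)) ::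
         wordsF fuel ((l.dropWhile PySem.Chars.isspace).dropWhile (fun c => !PySem.Chars.isspace c))

def wordsC (l : List Char) : List (List Char) := wordsF (l.length + 1) l

-- the same with at most m leading words split off, the remainder kept whole (s.split(None, m))
def wordsBF : Nat → Nat → List Char → List (List Char)
  | 0, _, _ => []
  | fuel+1, m, l =>
    if (l.dropWhile PySem.Chars.isspace) = [] then []
    else if m = 0 then [l.dropWhile PySem.Chars.isspace]
    else ((l.dropWhile PySem.Chars.isspace).takeWhile (fun c => !PySem.Chars.isspace c)) ::
         wordsBF fuel (m - 1) ((l.dropWhile PySem.Chars.isspace).dropWhile (fun c => !PySem.Chars.isspace c))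

def wordsB (m : Nat) (l : List Char) : List (List Char) := wordsBF (l.length + 1) m l

theorem pvDropWord_lt (l : List Char) (h : l.dropWhile PySem.Chars.isspace ≠ []) :
    ((l.dropWhile PySem.Chars.isspace).dropWhile (fun c => !PySem.Chars.isspace c)).length < l.length := by
  have h1 : (l.dropWhile PySem.Chars.isspace).length ≤ l.length := List.length_dropWhile_le _ _
  cases hl : l.dropWhile PySem.Chars.isspace with
  | nil => exact absurd hl h
  | cons c t =>
    have hc : PySem.Chars.isspace c = false := by
      have := List.head_dropWhile_not (p := PySem.Chars.isspace) (l := l)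
      simp_all
    rw [hl] at h1
    simp only [List.dropWhile_cons, hc, Bool.not_false, if_true]
    have := List.length_dropWhile_le (fun c => !PySem.Chars.isspace c) t
    simp at h1 ⊢
    omega

theorem wordsF_irrel : ∀ (f1 f2 : Nat) (l : List Char), l.length < f1 → l.length < f2 →
    wordsF f1 l = wordsF f2 l := by
  intro f1
  induction f1 with
  | zero => intro f2 l h1 _; omega
  | succ f1 ih =>
    intro f2 l h1 h2
    cases f2 with
    | zero => omega
    | succ f2 =>
      simp only [wordsF]
      by_cases hd : l.dropWhile PySem.Chars.isspace = []
      · simp [hd]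
      · simp only [hd, if_false]
        have hlt := pvDropWord_lt l hd
        rw [ih f2 _ (by omega) (by omega)]

theorem wordsC_eq (l : List Char) : wordsC l =
    if (l.dropWhile PySem.Chars.isspace) = [] then []
    else ((l.dropWhile PySem.Chars.isspace).takeWhile (fun c => !PySem.Chars.isspace c)) ::
         wordsC ((l.dropWhile PySem.Chars.isspace).dropWhile (fun c => !PySem.Chars.isspace c)) := by
  by_cases hd : l.dropWhile PySem.Chars.isspace = []
  · rw [if_pos hd]
    unfold wordsC
    rw [wordsF, if_pos hd]
  · rw [if_neg hd]
    unfold wordsC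
    conv_lhs => rw [wordsF]
    rw [if_neg hd]
    congr 1
    have hlt := pvDropWord_lt l hd
    exact wordsF_irrel _ _ _ (by omega) (by omega)

theorem wordsBF_irrel : ∀ (f1 f2 m : Nat) (l : List Char), l.length < f1 → l.length < f2 →
    wordsBF f1 m l = wordsBF f2 m l := by
  intro f1
  induction f1 with
  | zero => intro f2 m l h1 _; omega
  | succ f1 ih =>
    intro f2 m l h1 h2
    cases f2 with
    | zero => omega
    | succ f2 =>
      simp only [wordsBF]
      by_cases hd : l.dropWhile PySem.Chars.isspace = []
      · simp [hd]
      · by_cases hm : m = 0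
        · simp [hd, hm]
        · simp only [hd, hm, if_false]
          have hlt := pvDropWord_lt l hd
          rw [ih f2 _ _ (by omega) (by omega)]

theorem wordsB_eq (m : Nat) (l : List Char) : wordsB m l =
    if (l.dropWhile PySem.Chars.isspace) = [] then []
    else if m = 0 then [l.dropWhile PySem.Chars.isspace]
    else ((l.dropWhile PySem.Chars.isspace).takeWhile (fun c => !PySem.Chars.isspace c)) ::
         wordsB (m - 1) ((l.dropWhile PySem.Chars.isspace).dropWhile (fun c => !PySem.Chars.isspace c)) := by
  by_cases hd : l.dropWhile PySem.Chars.isspace = []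
  · rw [if_pos hd]
    unfold wordsB
    rw [wordsBF, if_pos hd]
  · rw [if_neg hd]
    by_cases hm : m = 0
    · rw [if_pos hm]
      unfold wordsB
      rw [wordsBF, if_neg hd, if_pos hm]
    · rw [if_neg hm]
      unfold wordsB
      conv_lhs => rw [wordsBF]
      rw [if_neg hd, if_neg hm]
      congr 1
      have hlt := pvDropWord_lt l hd
      exact wordsBF_irrel _ _ _ _ (by omega) (by omega)

-- split₀Max.go with any fuel produces acc.reverse ++ the bounded word list with the same fuel
theorem split0Max_go_eq : ∀ (fuel : Nat) (m : Nat) (l : List Char) (acc : List (List Char)),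
    PySem.Chars.split₀Max.go fuel m l acc = acc.reverse ++ wordsBF fuel m l := by
  intro fuel
  induction fuel with
  | zero => intro m l acc; simp [PySem.Chars.split₀Max.go, wordsBF]
  | succ fuel ih =>
    intro m l acc
    rw [PySem.Chars.split₀Max.go]
    cases hd : l.dropWhile PySem.Chars.isspace with
    | nil => simp [wordsBF, hd]
    | cons c t =>
      by_cases hm : m = 0
      · simp [wordsBF, hd, hm]
      · simp only [wordsBF, hd, hm, if_false, reduceCtorEq]
        rw [ih]
        simp

theorem split0Max_eq (s : List Char) (m : Int) (hm : 0 ≤ m) :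
    PySem.Chars.split₀Max s m = wordsB m.toNat s := by
  rw [show PySem.Chars.split₀Max s m =
      if m < 0 then PySem.Chars.split₀ s else PySem.Chars.split₀Max.go (s.length + 1) m.toNat s [] from rfl]
  rw [if_neg (by omega)]
  rw [split0Max_go_eq]
  simp [wordsB]

theorem wordsC_cons_space (c : Char) (l : List Char) (hc : PySem.Chars.isspace c = true) :
    wordsC (c :: l) = wordsC l := by
  rw [wordsC_eq, wordsC_eq (l := l)]
  simp [List.dropWhile_cons, hc]

theorem wordsC_cons_nonspace (c : Char) (l : List Char) (hc : PySem.Chars.isspace c = false) :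
    wordsC (c :: l) = (c :: l.takeWhile (fun c => !PySem.Chars.isspace c)) ::
      wordsC (l.dropWhile (fun c => !PySem.Chars.isspace c)) := by
  rw [wordsC_eq]
  simp [List.dropWhile_cons, List.takeWhile_cons, hc]

theorem split0_go_eq : ∀ (l cur : List Char) (acc : List (List Char)),
    PySem.Chars.split₀.go l cur acc = acc.reverse ++
      (if cur = [] then wordsC l
       else (cur.reverse ++ l.takeWhile (fun c => !PySem.Chars.isspace c)) ::
            wordsC (l.dropWhile (fun c => !PySem.Chars.isspace c))) := by
  intro l
  induction l with
  | nil =>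
    intro cur acc
    rw [PySem.Chars.split₀.go]
    by_cases hcur : cur = []
    · simp [hcur, wordsC, wordsF]
    · have : cur.isEmpty = false := by simp [List.isEmpty_iff, hcur]
      simp [this, hcur, wordsC, wordsF]
  | cons c rest ih =>
    intro cur acc
    rw [PySem.Chars.split₀.go]
    by_cases hc : PySem.Chars.isspace c = true
    · rw [if_pos hc]
      by_cases hcur : cur = []
      · have : cur.isEmpty = true := by simp [List.isEmpty_iff, hcur]
        rw [if_pos this, ih, if_pos rfl]
        simp [hcur, wordsC_cons_space c rest hc]
      · have : cur.isEmpty = false := by simp [List.isEmpty_iff, hcur]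
        rw [if_neg (by simp [this]), ih, if_pos rfl]
        simp only [List.reverse_cons, if_neg hcur]
        rw [List.takeWhile_cons, List.dropWhile_cons]
        simp [hc, wordsC_cons_space c rest hc]
    · have hc' : PySem.Chars.isspace c = false := by simpa using hc
      rw [if_neg (by simp [hc'])]
      rw [ih, if_neg (by simp)]
      by_cases hcur : cur = []
      · subst hcur
        simp only [if_pos rfl]
        rw [wordsC_cons_nonspace c rest hc']
        simp
      · rw [if_neg hcur]
        rw [List.takeWhile_cons, List.dropWhile_cons]
        simp [hc']

theorem split0_eq (s : List Char) : PySem.Chars.split₀ s = wordsC s := by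
  rw [show PySem.Chars.split₀ s = PySem.Chars.split₀.go s [] [] from rfl]
  rw [split0_go_eq]
  simp

theorem take_wordsB : ∀ (k m : Nat) (l : List Char), k ≤ m →
    (wordsB m l).take k = (wordsC l).take k := by
  intro k
  induction k with
  | zero => intro m l _; simp
  | succ k ih =>
    intro m l hk
    rw [wordsB_eq, wordsC_eq]
    by_cases hd : l.dropWhile PySem.Chars.isspace = []
    · simp [hd]
    · have hm : m ≠ 0 := by omega
      simp only [hd, hm, if_false, List.take_succ_cons]
      rw [ih (m - 1) _ (by omega)]

theorem wordsC_allspace (l : List Char) (h : ∀ c ∈ l, PySem.Chars.isspace c = true) :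
    wordsC l = [] := by
  rw [wordsC_eq, if_pos (List.dropWhile_eq_nil_iff.mpr h)]

theorem takeWhile_nonspace_of_allspace (l : List Char) (h : ∀ c ∈ l, PySem.Chars.isspace c = true) :
    l.takeWhile (fun c => !PySem.Chars.isspace c) = [] := by
  cases l with
  | nil => rfl
  | cons c t => simp [List.takeWhile_cons, h c (by simp)]

theorem dropWhile_nonspace_of_allspace (l : List Char) (h : ∀ c ∈ l, PySem.Chars.isspace c = true) :
    l.dropWhile (fun c => !PySem.Chars.isspace c) = l := by
  cases l with
  | nil => rfl
  | cons c t => simp [List.dropWhile_cons, h c (by simp)]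

-- appending one word (plus trailing spaces) after a space boundary appends one word
theorem wordsC_snoc_word : ∀ (n : Nat) (a w sp : List Char), a.length ≤ n → w ≠ [] →
    (∀ c ∈ w, PySem.Chars.isspace c = false) → (∀ c ∈ sp, PySem.Chars.isspace c = true) →
    (∀ c, a.getLast? = some c → PySem.Chars.isspace c = true) →
    wordsC (a ++ w ++ sp) = wordsC a ++ [w] := by
  intro n
  induction n with
  | zero =>
    intro a w sp hn hw hwns hsp _
    have ha : a = [] := by
      cases a with
      | nil => rfl
      | cons _ _ => simp at hn
    subst ha
    simp only [List.nil_append]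
    obtain ⟨c, w', rfl⟩ : ∃ c w', w = c :: w' := by
      cases w with
      | nil => exact absurd rfl hw
      | cons c w' => exact ⟨c, w', rfl⟩
    have hc : PySem.Chars.isspace c = false := hwns c (by simp)
    have hw' : ∀ x ∈ w', PySem.Chars.isspace x = false := fun x hx => hwns x (by simp [hx])
    rw [show (c :: w') ++ sp = c :: (w' ++ sp) from rfl]
    rw [wordsC_cons_nonspace c _ hc]
    have htw : (w' ++ sp).takeWhile (fun c => !PySem.Chars.isspace c) = w' := by
      rw [List.takeWhile_append]
      have hself : w'.takeWhile (fun c => !PySem.Chars.isspace c) = w' :=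
        List.takeWhile_eq_self_iff.mpr (by intro x hx; simp [hw' x hx])
      rw [if_pos (by rw [hself])]
      rw [takeWhile_nonspace_of_allspace sp hsp, List.append_nil]
    have hdw : (w' ++ sp).dropWhile (fun c => !PySem.Chars.isspace c) = sp := by
      rw [List.dropWhile_append]
      have hnil : w'.dropWhile (fun c => !PySem.Chars.isspace c) = [] :=
        List.dropWhile_eq_nil_iff.mpr (by intro x hx; simp [hw' x hx])
      rw [if_pos (by rw [hnil]; rfl)]
      exact dropWhile_nonspace_of_allspace sp hsp
    rw [htw, hdw, wordsC_allspace sp hsp]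
    simp [wordsC, wordsF]
  | succ n ih =>
    intro a w sp hn hw hwns hsp hlast
    cases a with
    | nil =>
      exact ih [] w sp (by simp) hw hwns hsp (by intro c hc; simp at hc)
    | cons c a' =>
      by_cases hc : PySem.Chars.isspace c = true
      · rw [show (c :: a') ++ w ++ sp = c :: (a' ++ w ++ sp) from rfl]
        rw [wordsC_cons_space c _ hc, wordsC_cons_space c _ hc]
        apply ih a' w sp (by simpa using hn) hw hwns hsp
        intro x hx
        apply hlast
        cases a' with
        | nil => simp at hx
        | cons y t => rw [List.getLast?_cons_cons]; exact hx
      · have hc' : PySem.Chars.isspace c = false := by simpa using hc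
        have ha' : a' ≠ [] := by
          intro h
          subst h
          have := hlast c rfl
          rw [this] at hc'
          exact Bool.noConfusion hc'
        obtain ⟨y, t, rfl⟩ : ∃ y t, a' = y :: t := by
          cases a' with
          | nil => exact absurd rfl ha'
          | cons y t => exact ⟨y, t, rfl⟩
        obtain ⟨e, he⟩ : ∃ e, (y :: t).getLast? = some e := by
          cases hq : (y :: t).getLast? with
          | some v => exact ⟨v, rfl⟩
          | none => simp [List.getLast?_eq_none_iff] at hq
        have hes : PySem.Chars.isspace e = true := by
          apply hlast
          rw [List.getLast?_cons_cons]
          exact he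
        have hmem : e ∈ (y :: t) := List.mem_of_getLast? he
        have hnotall : ¬ ((y :: t).takeWhile (fun c => !PySem.Chars.isspace c) = (y :: t)) := by
          intro hall
          have := List.mem_takeWhile_imp (p := fun c => !PySem.Chars.isspace c) (by rw [hall]; exact hmem)
          simp [hes] at this
        have hlen_ne : ¬ (((y :: t).takeWhile (fun c => !PySem.Chars.isspace c)).length = (y :: t).length) := by
          intro hlen
          exact hnotall ((List.takeWhile_prefix _).eq_of_length hlen)
        have hdne : (y :: t).dropWhile (fun c => !PySem.Chars.isspace c) ≠ [] := by
          intro hnil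
          have := List.dropWhile_eq_nil_iff.mp hnil e hmem
          simp [hes] at this
        have htw : ((y :: t) ++ (w ++ sp)).takeWhile (fun c => !PySem.Chars.isspace c)
            = (y :: t).takeWhile (fun c => !PySem.Chars.isspace c) := by
          rw [List.takeWhile_append, if_neg hlen_ne]
        have hdw : ((y :: t) ++ (w ++ sp)).dropWhile (fun c => !PySem.Chars.isspace c)
            = (y :: t).dropWhile (fun c => !PySem.Chars.isspace c) ++ (w ++ sp) := by
          rw [List.dropWhile_append, if_neg (by simp [List.isEmpty_iff, hdne])]
        have hbnd : ∀ x, ((y :: t).dropWhile (fun c => !PySem.Chars.isspace c)).getLast? = some x →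
            PySem.Chars.isspace x = true := by
          intro x hx
          obtain ⟨u, hu⟩ := List.dropWhile_suffix (l := y :: t) (fun c => !PySem.Chars.isspace c)
          have : (y :: t).getLast? = some x := by
            rw [← hu, List.getLast?_append, hx]
            rfl
          rw [he] at this
          injection this with hxe
          rw [← hxe]
          exact hes
        have hih := ih ((y :: t).dropWhile (fun c => !PySem.Chars.isspace c)) w sp
          (le_trans (List.length_dropWhile_le _ _) (by simpa using hn)) hw hwns hsp hbnd
        rw [show (c :: (y :: t)) ++ w ++ sp = c :: ((y :: t) ++ (w ++ sp)) from (by simp)]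
        rw [wordsC_cons_nonspace c _ hc', wordsC_cons_nonspace c _ hc']
        rw [htw, hdw]
        rw [← List.append_assoc, hih]
        simp

theorem wordsC_reverse : ∀ (n : Nat) (l : List Char), l.length ≤ n →
    wordsC l.reverse = ((wordsC l).map List.reverse).reverse := by
  intro n
  induction n with
  | zero =>
    intro l hl
    have : l = [] := by
      cases l with
      | nil => rfl
      | cons _ _ => simp at hl
    subst this
    simp [wordsC, wordsF]
  | succ n ih =>
    intro l hl
    cases hd : l.dropWhile PySem.Chars.isspace with
    | nil =>
      have hall : ∀ c ∈ l, PySem.Chars.isspace c = true := List.dropWhile_eq_nil_iff.mp hd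
      rw [wordsC_allspace l hall,
          wordsC_allspace l.reverse (by intro c hc; exact hall c (List.mem_reverse.mp hc))]
      rfl
    | cons c t =>
      have hdne : l.dropWhile PySem.Chars.isspace ≠ [] := by rw [hd]; simp
      have hc : PySem.Chars.isspace c = false := by
        have h := List.head_dropWhile_not (p := PySem.Chars.isspace) (l := l) hdne
        have h2 : (l.dropWhile PySem.Chars.isspace).head? = some c := by rw [hd]; rfl
        rw [List.head?_eq_head hdne] at h2
        injection h2 with h3
        rw [h3] at h
        exact h
      -- pieces
      have hsplit : l = l.takeWhile PySem.Chars.isspace ++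
          ((c :: t).takeWhile (fun c => !PySem.Chars.isspace c) ++
           (c :: t).dropWhile (fun c => !PySem.Chars.isspace c)) := by
        rw [List.takeWhile_append_dropWhile]
        conv_lhs => rw [← List.takeWhile_append_dropWhile (p := PySem.Chars.isspace) (l := l), hd]
      have hlhs : wordsC l = (c :: t).takeWhile (fun c => !PySem.Chars.isspace c) ::
          wordsC ((c :: t).dropWhile (fun c => !PySem.Chars.isspace c)) := by
        rw [wordsC_eq, if_neg hdne, hd]
      have hs0 : ∀ x ∈ l.takeWhile PySem.Chars.isspace, PySem.Chars.isspace x = true :=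
        fun x hx => List.mem_takeWhile_imp hx
      have hwall : ∀ x ∈ (c :: t).takeWhile (fun c => !PySem.Chars.isspace c),
          PySem.Chars.isspace x = false := by
        intro x hx
        have := List.mem_takeWhile_imp hx
        simpa using this
      have hwne : (c :: t).takeWhile (fun c => !PySem.Chars.isspace c) ≠ [] := by
        rw [List.takeWhile_cons, if_pos (by simp [hc])]
        simp
      have hrlen : ((c :: t).dropWhile (fun c => !PySem.Chars.isspace c)).length ≤ n := by
        have := pvDropWord_lt l hdne
        rw [hd] at this
        omega
      have hrev : l.reverse = ((c :: t).dropWhile (fun c => !PySem.Chars.isspace c)).reverse ++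
          ((c :: t).takeWhile (fun c => !PySem.Chars.isspace c)).reverse ++
          (l.takeWhile PySem.Chars.isspace).reverse := by
        conv_lhs => rw [hsplit]
        rw [List.reverse_append, List.reverse_append]
      have hbnd : ∀ x, (((c :: t).dropWhile (fun c => !PySem.Chars.isspace c)).reverse).getLast? = some x →
          PySem.Chars.isspace x = true := by
        intro x hx
        rw [List.getLast?_reverse] at hx
        have hzne : (c :: t).dropWhile (fun c => !PySem.Chars.isspace c) ≠ [] := by
          intro h0
          rw [h0] at hx
          simp at hx
        have hz := List.head_dropWhile_not (p := fun c => !PySem.Chars.isspace c) (l := c :: t) hzne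
        rw [List.head?_eq_head hzne] at hx
        injection hx with hhead
        rw [hhead] at hz
        simpa using hz
      rw [hrev]
      rw [wordsC_snoc_word (((c :: t).dropWhile (fun c => !PySem.Chars.isspace c)).reverse.length)
            _ _ _ (le_refl _)
            (by simpa using hwne)
            (by intro x hx; exact hwall x (List.mem_reverse.mp hx))
            (by intro x hx; exact hs0 x (List.mem_reverse.mp hx))
            hbnd]
      rw [ih _ hrlen, hlhs]
      simp

-- A's accumulator loop is the disjunction of the per-iteration tests
theorem foldl_tests (p q : Int → Bool) : ∀ (l : List Int) (init : Bool),
    (l.foldl (fun result spanns => if q spanns then true else if p spanns then true else result) init)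
    = (init || l.any fun x => p x || q x) := by
  intro l
  induction l with
  | nil => intro init; simp
  | cons x xs ih =>
    intro init
    simp only [List.foldl_cons, List.any_cons]
    rw [ih]
    cases hp : p x <;> cases hq : q x <;> cases init <;> simp [hp, hq]

theorem any_eq_of_mono {α : Type} (l : List α) (f : α → Bool) (m : α) (hm : m ∈ l)
    (hmono : ∀ x ∈ l, f x = true → f m = true) : l.any f = f m := by
  cases hf : f m with
  | true => exact List.any_eq_true.mpr ⟨m, hm, hf⟩
  | false =>
    refine List.any_eq_false.mpr ?_
    intro x hx hfx
    rw [hmono x hx hfx] at hf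
    exact Bool.noConfusion hf

-- the last-k / first-k word sublists grow with k
theorem any_drop_mono (w : List (List Char)) (g : String → Bool) (k K : Nat) (h : k ≤ K)
    (hh : (((w.drop (w.length - k)).map String.ofList).any g) = true) :
    (((w.drop (w.length - K)).map String.ofList).any g) = true := by
  rw [List.any_eq_true] at hh ⊢
  obtain ⟨y, hy, hgy⟩ := hh
  refine ⟨y, ?_, hgy⟩
  rw [List.mem_map] at hy ⊢
  obtain ⟨cc, hcc, rfl⟩ := hy
  refine ⟨cc, ?_, rfl⟩
  have hdd : w.drop (w.length - k) = (w.drop (w.length - K)).drop ((w.length - k) - (w.length - K)) := by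
    rw [List.drop_drop]
    congr 1
    omega
  rw [hdd] at hcc
  exact List.mem_of_mem_drop hcc

theorem any_take_mono (w : List (List Char)) (g : String → Bool) (k K : Nat) (h : k ≤ K)
    (hh : (((w.take k).map String.ofList).any g) = true) :
    (((w.take K).map String.ofList).any g) = true := by
  rw [List.any_eq_true] at hh ⊢
  obtain ⟨y, hy, hgy⟩ := hh
  refine ⟨y, ?_, hgy⟩
  rw [List.mem_map] at hy ⊢
  obtain ⟨cc, hcc, rfl⟩ := hy
  refine ⟨cc, ?_, rfl⟩
  have htt : w.take k = (w.take K).take k := by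
    rw [List.take_take, Nat.min_eq_left h]
  rw [htt] at hcc
  exact List.mem_of_mem_take hcc

-- the four slice computations, reduced to drop/take on the word list
theorem sliceA_pre (pre : String) (k : Nat) (hk : 0 < k) :
    PySem.List.slice (pyRsplit₀Max pre ((k : Int) + 1)) (some (-(k : Int))) none
      = ((wordsC pre.toList).drop ((wordsC pre.toList).length - k)).map String.ofList := by
  unfold pyRsplit₀Max
  rw [show PySem.Str.split₀Max (String.ofList pre.toList.reverse) ((k : Int) + 1)
        = (PySem.Chars.split₀Max (String.ofList pre.toList.reverse).toList ((k : Int) + 1)).map String.ofList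
      from rfl]
  rw [String.toList_ofList]
  rw [split0Max_eq _ _ (by positivity)]
  rw [show ((k : Int) + 1).toNat = k + 1 by omega]
  rw [List.map_map]
  have hcomp : ((fun p => String.ofList p.toList.reverse) ∘ String.ofList)
      = (fun c : List Char => String.ofList c.reverse) := by
    funext c
    simp
  rw [hcomp]
  rw [PySem.List.slice_from_neg_natCast _ k hk]
  set M := (wordsB (k + 1) pre.toList.reverse).map (fun c : List Char => String.ofList c.reverse) with hM
  rw [List.length_reverse, List.drop_reverse]
  have hmin : M.length - (M.length - k) = min k M.length := by omega
  rw [hmin, ← List.take_take, List.take_length]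
  rw [hM, ← List.map_take]
  rw [take_wordsB k (k + 1) _ (by omega)]
  rw [wordsC_reverse pre.toList.length pre.toList (le_refl _)]
  rw [List.take_reverse, List.length_map]
  rw [← List.map_drop]
  have hfin : ((fun c : List Char => String.ofList c.reverse) ∘ List.reverse)
      = fun c : List Char => String.ofList c := by
    funext c
    simp
  simp [List.map_map, List.map_reverse, List.reverse_reverse, hfin]

theorem sliceA_post (post : String) (k : Nat) :
    PySem.List.slice (PySem.Str.split₀Max post ((k : Int) + 1)) none (some (k : Int))
      = ((wordsC post.toList).take k).map String.ofList := by
  rw [show PySem.Str.split₀Max post ((k : Int) + 1)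
        = (PySem.Chars.split₀Max post.toList ((k : Int) + 1)).map String.ofList from rfl]
  rw [split0Max_eq _ _ (by positivity), show ((k : Int) + 1).toNat = k + 1 by omega]
  rw [PySem.List.slice_to _ (by positivity), Int.toNat_natCast]
  rw [← List.map_take, take_wordsB k (k + 1) _ (by omega)]

theorem sliceB_pre (pre : String) (k : Nat) (hk : 0 < k) :
    PySem.List.slice (PySem.Str.split₀ pre) (some (-(k : Int))) none
      = ((wordsC pre.toList).drop ((wordsC pre.toList).length - k)).map String.ofList := by
  rw [show PySem.Str.split₀ pre = (PySem.Chars.split₀ pre.toList).map String.ofList from rfl, split0_eq]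
  rw [PySem.List.slice_from_neg_natCast _ k hk, List.length_map, ← List.map_drop]

theorem sliceB_post (post : String) (k : Nat) :
    PySem.List.slice (PySem.Str.split₀ post) none (some (k : Int))
      = ((wordsC post.toList).take k).map String.ofList := by
  rw [show PySem.Str.split₀ post = (PySem.Chars.split₀ post.toList).map String.ofList from rfl, split0_eq]
  rw [PySem.List.slice_to _ (by positivity), Int.toNat_natCast, ← List.map_take]

-- ===== VERDICT (by name: the statement is the Claim_ definition above) =====
theorem ngram_lookup_spec : Claim_equal_ngram_lookup := by
  intro d st en wl sp _hdom
  unfold Spec_ngram_lookup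
  simp only [ngram_lookup, ngram_lookup_alt]
  rw [foldl_tests]
  by_cases hsp : sp ≤ 1
  · rw [PySem.List.pyRange_one_eq_nil hsp]
    simp [show sp - 1 ≤ 0 by omega]
  · have hsp1 : 1 < sp := by omega
    rw [if_neg (show ¬ sp - 1 ≤ 0 by omega)]
    set K : Nat := (sp - 1).toNat with hKdef
    have hK0 : 0 < K := by omega
    have hKc : (K : Int) = sp - 1 := by omega
    rw [Bool.false_or]
    rw [any_eq_of_mono _ _ (sp - 1)
      (PySem.List.mem_pyRange_one.mpr ⟨by omega, by omega⟩) ?mono]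
    case mono =>
      intro x hx hfx
      obtain ⟨hx1, hx2⟩ := PySem.List.mem_pyRange_one.mp hx
      set k : Nat := x.toNat with hkdef
      have hk0 : 0 < k := by omega
      have hkx : (k : Int) = x := by omega
      have hkK : k ≤ K := by omega
      simp only [] at hfx ⊢
      rw [← hkx] at hfx
      rw [sliceA_pre _ k hk0, sliceA_post _ k] at hfx
      rw [← hKc]
      rw [sliceA_pre _ K hK0, sliceA_post _ K]
      rw [Bool.or_eq_true] at hfx ⊢
      rcases hfx with h | h
      · exact Or.inl (any_drop_mono _ _ k K hkK h)
      · exact Or.inr (any_take_mono _ _ k K hkK h)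
    rw [← hKc]
    rw [sliceA_pre _ K hK0, sliceA_post _ K]
    rw [sliceB_pre _ K hK0, sliceB_post _ K]
    simp
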